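-- pv_equiv track=rewrite | github.com/swarga1234/GEEKS_FOR_GEEKS_PRACTICE | Searching/searching_practice3.py | findRepeating
-- ===== SOURCE A (Python) =====
-- def findRepeating(arr,n):
--
--     # As the arr contains only consecutive elements so if the size of arr is n and the first element is x, then 2nd element will be x+1, 3rd will be x+2, nth will be x+n-1, iff there are no repeating elements. So every time a element repeats the value of nth element will decrease by 1. So to find the count of the repeating element we can just do: (x+n-1)-arr[n-1]+1 ie what should have been the value nth element if no repeating - what is the value of nth element + 1
--
--     total_repeats=(arr[0]+n-1)-arr[n-1]
--
--     #Lets find the number which is repeating. So using binary search if we calculate mid then if arr[0]+mid== arr[mid] then there are no repeating nos between 0 to mid, so if repeating nos exists it should be from mid+1 to n-1. If arr[0]+mid<arr[mid] then surely there are repeating nos and it is between 0 to mid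
--
--     start=0
--     end=n-1
--     mid=start+(end-start)//2
--     while start<end:
--         if arr[mid]>=arr[0]+mid:
--             start=mid+1
--         else:
--             end=mid
--         mid=start+(end-start)//2
--     repeating_nos=arr[start]
--     if total_repeats==0:
--         total_repeats=-1
--         repeating_nos=-1
--     else:
--         total_repeats+=1
--
--     return [repeating_nos,total_repeats]
-- ===== SOURCE B (Python) =====
-- def findRepeating(arr, n):
--     # same task, recursive lower-bound binary search + single-expression result
--     def lo_bound(lo, hi):
--         # first position of the half-space where arr[i]-i drops below arr[0]
--         if lo >= hi:
--             return lo
--         mid = (lo + hi) // 2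
--         if arr[mid] - mid < arr[0]:
--             return lo_bound(lo, mid)
--         return lo_bound(mid + 1, hi)
--
--     k = (arr[0] + n - 1) - arr[n - 1]
--     return [-1, -1] if k == 0 else [arr[lo_bound(0, n - 1)], k + 1]
-- ===== Notes on version B (the rewrite author's own statement) =====
-- stated objective: alternative
-- what changed: A's in-place while-loop binary search (mutating start/end/mid) is replaced by a self-contained recursive lower-bound helper with the comparison rearranged to arr[mid]-mid < arr[0], and the repeat-count post-processing is collapsed into a single conditional expression.
import Mathlib
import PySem

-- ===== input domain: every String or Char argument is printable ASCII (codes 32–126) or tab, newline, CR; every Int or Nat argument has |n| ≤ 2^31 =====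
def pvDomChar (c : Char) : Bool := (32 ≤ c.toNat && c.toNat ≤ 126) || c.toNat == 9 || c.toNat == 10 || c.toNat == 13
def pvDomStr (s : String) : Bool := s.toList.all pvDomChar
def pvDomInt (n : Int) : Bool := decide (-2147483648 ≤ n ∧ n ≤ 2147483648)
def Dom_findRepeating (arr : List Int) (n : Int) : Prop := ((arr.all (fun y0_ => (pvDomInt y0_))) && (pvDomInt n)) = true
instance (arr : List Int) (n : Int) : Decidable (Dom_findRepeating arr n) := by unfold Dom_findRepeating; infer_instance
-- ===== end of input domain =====

-- B replaces A's while-loop binary search by a recursive lower-bound helper with a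
-- rearranged comparison and a single-expression result; same O(log n) cost ("alternative" decomposition, not faster).


-- midpoint bound used by both ports' termination
theorem pvMidLt (s e : Int) (h : s < e) :
    s ≤ s + PySem.Int.floordiv (e - s) 2 ∧ s + PySem.Int.floordiv (e - s) 2 < e := by
  rw [PySem.Int.floordiv_eq_ediv_of_pos (by omega)]
  have h1 := Int.mul_ediv_add_emod (e - s) 2
  have h2 := Int.emod_nonneg (e - s) (by omega : (2:Int) ≠ 0)
  have h3 := Int.emod_lt_of_pos (e - s) (by omega : (0:Int) < 2)
  omega

-- ===== PORT A =====
-- A's while loop as structural recursion on (start, end); Python recomputes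
-- mid = start + (end - start)//2 at every loop head, so the port recomputes it there too.
def findRepeatingLoop (arr : List Int) (start end_ : Int) : Int :=
  if h : start < end_ then
    let mid := start + PySem.Int.floordiv (end_ - start) 2
    if PySem.List.pyGetD arr mid 0 ≥ PySem.List.pyGetD arr 0 0 + mid then
      findRepeatingLoop arr (mid + 1) end_
    else
      findRepeatingLoop arr start mid
  else start
termination_by (end_ - start).toNat
decreasing_by
  · have := pvMidLt start end_ h; omega
  · have := pvMidLt start end_ h; omega

def findRepeating (arr : List Int) (n : Int) : List Int :=
  let total_repeats := (PySem.List.pyGetD arr 0 0 + n - 1) - PySem.List.pyGetD arr (n - 1) 0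
  let start := findRepeatingLoop arr 0 (n - 1)
  let repeating_nos := PySem.List.pyGetD arr start 0
  if total_repeats = 0 then [-1, -1] else [repeating_nos, total_repeats + 1]

-- ===== PORT B =====
def loBound (arr : List Int) (lo hi : Int) : Int :=
  if h : lo < hi then
    let mid := PySem.Int.floordiv (lo + hi) 2
    if PySem.List.pyGetD arr mid 0 - mid < PySem.List.pyGetD arr 0 0 then
      loBound arr lo mid
    else
      loBound arr (mid + 1) hi
  else lo
termination_by (hi - lo).toNat
decreasing_by
  all_goals
    have hb := pvMidLt lo hi h
    have : PySem.Int.floordiv (lo + hi) 2 = lo + PySem.Int.floordiv (hi - lo) 2 := by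
      rw [PySem.Int.floordiv_eq_ediv_of_pos (by omega : (0:Int) < 2),
          PySem.Int.floordiv_eq_ediv_of_pos (by omega : (0:Int) < 2)]
      have : lo + hi = (hi - lo) + lo * 2 := by ring
      rw [this, Int.add_mul_ediv_right _ _ (by omega : (2:Int) ≠ 0)]
      ring
    omega

def findRepeating_alt (arr : List Int) (n : Int) : List Int :=
  let k := (PySem.List.pyGetD arr 0 0 + n - 1) - PySem.List.pyGetD arr (n - 1) 0
  if k = 0 then [-1, -1]
  else [PySem.List.pyGetD arr (loBound arr 0 (n - 1)) 0, k + 1]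

-- ===== PRECONDITION & SPEC =====
-- Pre_: exactly the inputs where Python A returns normally (arr[0], arr[n-1] and the
-- probed arr[mid], mid ∈ [0, n-1], are all valid Python indices); elsewhere A raises IndexError.
def Pre_findRepeating (arr : List Int) (n : Int) : Prop :=
  arr ≠ [] ∧ 1 - (arr.length : Int) ≤ n ∧ n ≤ (arr.length : Int)
instance (arr : List Int) (n : Int) : Decidable (Pre_findRepeating arr n) := by
  unfold Pre_findRepeating; infer_instance
def pvWitness_findRepeating : List Int × Int := ([3, 4, 4, 5], 4)

def Spec_findRepeating (arr : List Int) (n : Int) (out : List Int) : Prop := out = findRepeating_alt arr n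
instance (arr : List Int) (n : Int) (out : List Int) : Decidable (Spec_findRepeating arr n out) := by unfold Spec_findRepeating; infer_instance

-- ===== CLAIM (what is proved, stated in full; the proofs are below) =====
def Claim_equal_findRepeating : Prop := ∀ (arr : List Int) (n : Int), Dom_findRepeating arr n → Pre_findRepeating arr n → Spec_findRepeating arr n (findRepeating arr n)

-- ===== LEMMAS AND PROOFS =====

theorem floordiv_mid_shift (lo hi : Int) :
    PySem.Int.floordiv (lo + hi) 2 = lo + PySem.Int.floordiv (hi - lo) 2 := by
  rw [PySem.Int.floordiv_eq_ediv_of_pos (by omega : (0:Int) < 2),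
      PySem.Int.floordiv_eq_ediv_of_pos (by omega : (0:Int) < 2)]
  have h : lo + hi = (hi - lo) + lo * 2 := by ring
  rw [h, Int.add_mul_ediv_right _ _ (by omega : (2:Int) ≠ 0)]
  ring

theorem loop_eq (arr : List Int) (s e : Int) :
    findRepeatingLoop arr s e = loBound arr s e := by
  by_cases h : s < e
  · rw [findRepeatingLoop, loBound]
    simp only [h, dite_true]
    rw [floordiv_mid_shift s e]
    by_cases hc : PySem.List.pyGetD arr (s + PySem.Int.floordiv (e - s) 2) 0 ≥
        PySem.List.pyGetD arr 0 0 + (s + PySem.Int.floordiv (e - s) 2)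
    · rw [if_pos hc, if_neg (by omega), loop_eq]
    · rw [if_neg hc, if_pos (by omega), loop_eq]
  · rw [findRepeatingLoop, loBound]
    simp [h]
termination_by (e - s).toNat
decreasing_by
  · have := pvMidLt s e h; omega
  · have := pvMidLt s e h; omega

-- ===== VERDICT (by name: the statement is the Claim_ definition above) =====
theorem findRepeating_spec : Claim_equal_findRepeating := by
  intro arr n _ _
  unfold Spec_findRepeating findRepeating findRepeating_alt
  rw [loop_eq]
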